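-- pv_equiv track=rewrite | github.com/katya-avem/soviet_plays | src/txt_to_xml.py | find_block_between_empty_lines
-- ===== SOURCE A (Python) =====
-- def find_block_between_empty_lines(lines: list, block_index: int) -> tuple:
--     count = 0
--     block_start_index = -1
--     block_end_index = -1
--     block_lines = []
--
--     for index, line in enumerate(lines):
--         if len(line.strip()) == 0:
--             count += 1
--
--             if count == block_index + 1:
--                 block_end_index = index
--                 break
--
--             continue
--
--         if count == block_index:
--             if block_start_index == -1:
--                 block_start_index = index
--
--             block_lines.append(line)
--
--     if block_start_index != -1 and block_end_index == -1:
--         block_end_index = len(lines)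
--
--     return block_start_index, block_end_index, block_lines
-- ===== SOURCE B (Python) =====
-- def find_block_between_empty_lines(lines: list, block_index: int) -> tuple:
--     seps = [i for i, line in enumerate(lines) if len(line.strip()) == 0]
--     if block_index < 0 or block_index > len(seps):
--         return -1, -1, []
--     lo = 0 if block_index == 0 else seps[block_index - 1] + 1
--     hi = seps[block_index] if block_index < len(seps) else len(lines)
--     block_start_index = lo if lo < hi else -1
--     if block_index < len(seps):
--         block_end_index = seps[block_index]
--     else:
--         block_end_index = len(lines) if lo < hi else -1
--     return block_start_index, block_end_index, lines[lo:hi]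
-- ===== Notes on version B (the rewrite author's own statement) =====
-- stated objective: alternative
-- what changed: A's single counting scan with early break and a post-loop fixup is replaced by building the list of empty-line (separator) indices once and deriving the block's start/end bounds and its lines by index arithmetic and one slice.
import Mathlib
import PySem

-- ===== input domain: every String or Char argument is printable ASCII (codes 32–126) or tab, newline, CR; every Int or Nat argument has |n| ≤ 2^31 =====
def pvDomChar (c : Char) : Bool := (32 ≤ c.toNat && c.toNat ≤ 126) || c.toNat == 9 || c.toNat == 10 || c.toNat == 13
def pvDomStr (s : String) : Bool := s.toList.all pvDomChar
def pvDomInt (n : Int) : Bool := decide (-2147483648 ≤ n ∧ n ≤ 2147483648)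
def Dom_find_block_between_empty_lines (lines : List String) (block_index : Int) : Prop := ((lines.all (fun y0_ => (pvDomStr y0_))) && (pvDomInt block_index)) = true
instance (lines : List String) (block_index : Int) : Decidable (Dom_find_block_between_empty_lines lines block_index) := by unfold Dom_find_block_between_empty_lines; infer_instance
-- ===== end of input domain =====

-- B replaces A's counting scan (with early break and post-loop fixup) by computing the
-- separator index list once and deriving the block's bounds by arithmetic and a slice
-- (objective: alternative decomposition, same O(n) cost).

-- `len(line.strip()) == 0` — shared emptiness test of both Pythons
def pvEmptyLine (l : String) : Bool := PySem.Str.len (PySem.Str.strip l) == 0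

-- ===== PORT A =====
def fbLoopA (bi : Int) : List (Int × String) → Int → Int → List String → Int × Int × List String
  | [], _count, start, acc => (start, -1, acc)
  | (i, l) :: rest, count, start, acc =>
    if pvEmptyLine l then
      if count + 1 == bi + 1 then (start, i, acc)
      else fbLoopA bi rest (count + 1) start acc
    else if count == bi then
      fbLoopA bi rest count (if start == -1 then i else start) (acc ++ [l])
    else fbLoopA bi rest count start acc

def find_block_between_empty_lines (lines : List String) (block_index : Int) : Int × Int × List String :=
  let r := fbLoopA block_index (PySem.List.enumerate lines 0) 0 (-1) []
  if r.1 != -1 && r.2.1 == -1 then (r.1, PySem.List.len lines, r.2.2) else r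

-- ===== PORT B =====
def find_block_between_empty_lines_alt (lines : List String) (block_index : Int) : Int × Int × List String :=
  let seps : List Int := (PySem.List.enumerate lines 0).filterMap
    (fun p => if pvEmptyLine p.2 then some p.1 else none)
  if block_index < 0 || block_index > PySem.List.len seps then (-1, -1, [])
  else
    -- the two indexings below are in range thanks to the guard; `.getD 0` is never taken
    let lo : Int := if block_index == 0 then 0 else (PySem.List.pyGet? seps (block_index - 1)).getD 0 + 1
    let hi : Int := if block_index < PySem.List.len seps then (PySem.List.pyGet? seps block_index).getD 0 else PySem.List.len lines
    let start : Int := if lo < hi then lo else -1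
    let endi : Int := if block_index < PySem.List.len seps then (PySem.List.pyGet? seps block_index).getD 0
                      else if lo < hi then PySem.List.len lines else -1
    (start, endi, PySem.List.slice lines (some lo) (some hi))

-- ===== PRECONDITION & SPEC =====
def Spec_find_block_between_empty_lines (lines : List String) (block_index : Int) (out : Int × Int × List String) : Prop := out = find_block_between_empty_lines_alt lines block_index
instance (lines : List String) (block_index : Int) (out : Int × Int × List String) : Decidable (Spec_find_block_between_empty_lines lines block_index out) := by unfold Spec_find_block_between_empty_lines; infer_instance

-- ===== CLAIM (what is proved, stated in full; the proofs are below) =====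
def Claim_equal_find_block_between_empty_lines : Prop := ∀ (lines : List String) (block_index : Int), Dom_find_block_between_empty_lines lines block_index → Spec_find_block_between_empty_lines lines block_index (find_block_between_empty_lines lines block_index)

-- ===== LEMMAS AND PROOFS =====

-- separator indices of `ls`, positions counted from `k` (proof-side view of B's `seps`)
def sepsL (ls : List String) (k : Int) : List Int :=
  match ls with
  | [] => []
  | l :: rest => if pvEmptyLine l then k :: sepsL rest (k + 1) else sepsL rest (k + 1)

-- the collecting phase of A's loop (count = block_index reached, start already set)
def collectFB (ls : List String) (k : Int) : Int × List String :=
  match ls with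
  | [] => (-1, [])
  | l :: rest =>
    if pvEmptyLine l then (k, [])
    else
      let r := collectFB rest (k + 1)
      (r.1, l :: r.2)

-- A's loop value from a fresh state, as structural recursion on the lines
def specFB (ls : List String) (k : Int) (bi : Int) : Int × Int × List String :=
  match ls with
  | [] => (-1, -1, [])
  | l :: rest =>
    if pvEmptyLine l then
      if bi = 0 then (-1, k, [])
      else specFB rest (k + 1) (bi - 1)
    else
      if bi = 0 then
        let r := collectFB rest (k + 1)
        (k, r.1, l :: r.2)
      else specFB rest (k + 1) bi

theorem fbLoopA_neg (bi : Int) (hbi : bi < 0) :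
    ∀ (pairs : List (Int × String)) (c s : Int) (acc : List String), 0 ≤ c →
      fbLoopA bi pairs c s acc = (s, -1, acc) := by
  intro pairs
  induction pairs with
  | nil => intro c s acc _; rfl
  | cons p rest ih =>
    intro c s acc hc
    obtain ⟨i, l⟩ := p
    have h1 : ((c + 1 : Int) == bi + 1) = false := by simp; omega
    have h2 : ((c : Int) == bi) = false := by simp; omega
    simp only [fbLoopA, h1, h2]
    split
    · exact ih (c + 1) s acc (by omega)
    · exact ih c s acc hc


theorem fbLoopA_shift :
    ∀ (pairs : List (Int × String)) (bi c s : Int) (acc : List String),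
      fbLoopA bi pairs c s acc = fbLoopA (bi - c) pairs 0 s acc := by
  intro pairs
  induction pairs with
  | nil => intro bi c s acc; rfl
  | cons p rest ih =>
    intro bi c s acc
    obtain ⟨i, l⟩ := p
    have h1 : ((c + 1 : Int) == bi + 1) = ((0 + 1 : Int) == (bi - c) + 1) := by
      rw [Bool.eq_iff_iff]
      simp only [beq_iff_eq]
      constructor <;> omega
    have h2 : ((c : Int) == bi) = ((0 : Int) == bi - c) := by
      rw [Bool.eq_iff_iff]
      simp only [beq_iff_eq]
      constructor <;> omega
    simp only [fbLoopA, ← h1, ← h2]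
    split
    · split
      · rfl
      · simp only [zero_add]
        rw [ih bi (c + 1), ih (bi - c) 1]
        have : bi - (c + 1) = bi - c - 1 := by ring
        rw [this]
    · split
      · rw [ih bi c, ih (bi - c) 0, sub_zero]
      · rw [ih bi c, ih (bi - c) 0, sub_zero]

theorem fbLoopA_collect :
    ∀ (ls : List String) (k s : Int) (acc : List String), s ≠ -1 →
      fbLoopA 0 (PySem.List.enumerate ls k) 0 s acc =
        (s, (collectFB ls k).1, acc ++ (collectFB ls k).2) := by
  intro ls
  induction ls with
  | nil => intro k s acc _; simp [PySem.List.enumerate_nil, fbLoopA, collectFB]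
  | cons l rest ih =>
    intro k s acc hs
    rw [PySem.List.enumerate_cons]
    have hs' : ((s : Int) == -1) = false := by simp [hs]
    by_cases he : pvEmptyLine l
    · simp [fbLoopA, collectFB, he]
    · simp only [fbLoopA, collectFB, he, hs', if_false, Bool.false_eq_true]
      rw [ih (k + 1) s (acc ++ [l]) hs]
      simp


theorem fbLoopA_spec :
    ∀ (ls : List String) (k bi : Int), 0 ≤ bi → 0 ≤ k →
      fbLoopA bi (PySem.List.enumerate ls k) 0 (-1) [] = specFB ls k bi := by
  intro ls
  induction ls with
  | nil => intro k bi _ _; simp [PySem.List.enumerate_nil, fbLoopA, specFB]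
  | cons l rest ih =>
    intro k bi hbi hk
    rw [PySem.List.enumerate_cons]
    by_cases he : pvEmptyLine l
    · by_cases h0 : bi = 0
      · simp [fbLoopA, specFB, he, h0]
      · have h1 : ((0 + 1 : Int) == bi + 1) = false := by simp; omega
        simp only [fbLoopA, specFB, he, h0, h1, if_true, if_false, Bool.false_eq_true]
        rw [show (0 + 1 : Int) = 1 by norm_num, fbLoopA_shift _ bi 1,
          ih (k + 1) (bi - 1) (by omega) (by omega)]
    · by_cases h0 : bi = 0
      · have hk' : (k : Int) ≠ -1 := by omega
        simp only [fbLoopA, specFB, he, h0, if_true, if_false, Bool.false_eq_true,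
          beq_self_eq_true]
        rw [List.nil_append, fbLoopA_collect rest (k + 1) k [l] hk']
        simp
      · have h2 : ((0 : Int) == bi) = false := by simp; omega
        simp only [fbLoopA, specFB, he, h0, h2, if_false, Bool.false_eq_true]
        exact ih (k + 1) bi hbi (by omega)


theorem sepsL_lb : ∀ (ls : List String) (k : Int), ∀ x ∈ sepsL ls k, k ≤ x := by
  intro ls
  induction ls with
  | nil => intro k x hx; simp [sepsL] at hx
  | cons l rest ih =>
    intro k x hx
    simp only [sepsL] at hx
    split at hx
    · rcases List.mem_cons.mp hx with h | h
      · omega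
      · have := ih (k + 1) x h; omega
    · have := ih (k + 1) x hx; omega


theorem collectFB_char : ∀ (ls : List String) (k : Int),
    collectFB ls k =
      (match sepsL ls k with
       | [] => (-1, ls)
       | s :: _ => (s, ls.take (s - k).toNat)) := by
  intro ls
  induction ls with
  | nil => intro k; rfl
  | cons l rest ih =>
    intro k
    by_cases he : pvEmptyLine l
    · simp [collectFB, sepsL, he]
    · simp only [collectFB, sepsL, he, if_false, Bool.false_eq_true, ih (k + 1)]
      cases hS : sepsL rest (k + 1) with
      | nil => simp
      | cons s tl =>
        have hlb : k + 1 ≤ s := sepsL_lb rest (k + 1) s (by rw [hS]; exact List.mem_cons_self)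
        simp only []
        have : (s - k).toNat = (s - (k + 1)).toNat + 1 := by omega
        rw [this, List.take_succ_cons]


theorem pyGet?_cons_shift (x : Int) (xs : List Int) (i : Int) (h : 1 ≤ i) :
    PySem.List.pyGet? (x :: xs) i = PySem.List.pyGet? xs (i - 1) := by
  rw [PySem.List.pyGet?_of_nonneg _ (by omega : (0:Int) ≤ i),
    PySem.List.pyGet?_of_nonneg _ (by omega : (0:Int) ≤ i - 1)]
  have : i.toNat = (i - 1).toNat + 1 := by omega
  rw [this, List.getElem?_cons_succ]

theorem sepsL_get_lb (ls : List String) (k j : Int) (h0 : 0 ≤ j)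
    (h1 : j < ((sepsL ls k).length : Int)) :
    k ≤ (PySem.List.pyGet? (sepsL ls k) j).getD 0 := by
  rw [PySem.List.pyGet?_of_nonneg _ h0]
  have hj : j.toNat < (sepsL ls k).length := by omega
  rw [List.getElem?_eq_getElem hj]
  exact sepsL_lb ls k _ (List.getElem_mem hj)

theorem specFB_char : ∀ (ls : List String) (k bi : Int), 0 ≤ k → 0 ≤ bi →
    specFB ls k bi =
      (let S := sepsL ls k
       if ((S.length : Int) < bi) then (-1, -1, ([] : List String))
       else
         let lo : Int := if bi = 0 then k else (PySem.List.pyGet? S (bi - 1)).getD 0 + 1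
         let hi : Int := if bi < (S.length : Int) then (PySem.List.pyGet? S bi).getD 0 else k + ls.length
         ((if lo < hi then lo else -1),
          (if bi < (S.length : Int) then (PySem.List.pyGet? S bi).getD 0 else -1),
          (ls.drop (lo - k).toNat).take (hi - lo).toNat)) := by
  intro ls
  induction ls with
  | nil =>
    intro k bi hk hbi
    simp only [specFB, sepsL, List.length_nil]
    by_cases h : (0 : Int) < bi
    · simp [h]
    · have hbi0 : bi = 0 := by omega
      simp [hbi0]
  | cons l rest ih =>
    intro k bi hk hbi
    by_cases he : pvEmptyLine l
    · -- separator head: sepsL (l :: rest) k = k :: sepsL rest (k+1)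
      have hS : sepsL (l :: rest) k = k :: sepsL rest (k + 1) := by simp [sepsL, he]
      set S' := sepsL rest (k + 1) with hS'
      have hget : (PySem.List.pyGet? (k :: S') 0).getD 0 = k := by
        rw [PySem.List.pyGet?_of_nonneg _ le_rfl]; rfl
      by_cases h0 : bi = 0
      · subst h0
        have hLHS : specFB (l :: rest) k 0 = (-1, k, []) := by simp [specFB, he]
        rw [hLHS]
        simp only [hS, List.length_cons, hget]
        simp
        omega
      · have hLHS : specFB (l :: rest) k bi = specFB rest (k + 1) (bi - 1) := by
          simp [specFB, he, h0]
        rw [hLHS, ih (k + 1) (bi - 1) (by omega) (by omega)]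
        simp only [hS, List.length_cons, List.length_cons, ← hS']
        push_cast
        have e1 : (((S'.length : Int) + 1) < bi) ↔ ((S'.length : Int) < bi - 1) := by omega
        have e2 : (bi < (S'.length : Int) + 1) ↔ (bi - 1 < (S'.length : Int)) := by omega
        have e4 : k + ((rest.length : Int) + 1) = (k + 1) + (rest.length : Int) := by ring
        simp only [e1, e2, e4, if_neg h0]
        by_cases hg : ((S'.length : Int) < bi - 1)
        · simp only [if_pos hg]
        · simp only [if_neg hg]
          by_cases h1 : bi = 1
          · subst h1
            have hsh2 : PySem.List.pyGet? (k :: S') 1 = PySem.List.pyGet? S' 0 := by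
              rw [pyGet?_cons_shift _ _ _ le_rfl]; norm_num
            have hdrop : (k + 1 - k).toNat = (k + 1 - (k + 1)).toNat + 1 := by omega
            simp only [show (1:Int) - 1 = 0 by norm_num, hsh2, hget, ite_true, hdrop, List.drop_succ_cons]
          · have hsh1 : PySem.List.pyGet? (k :: S') (bi - 1) = PySem.List.pyGet? S' (bi - 1 - 1) := pyGet?_cons_shift _ _ _ (by omega)
            have hsh2 : PySem.List.pyGet? (k :: S') bi = PySem.List.pyGet? S' (bi - 1) := pyGet?_cons_shift _ _ _ (by omega)
            simp only [hsh1, hsh2, if_neg (show ¬(bi - 1 = 0) by omega)]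
            set lo := (PySem.List.pyGet? S' (bi - 1 - 1)).getD 0 + 1 with hlo
            have hklo : k + 1 ≤ lo := by
              have := sepsL_get_lb rest (k + 1) (bi - 1 - 1) (by omega) (by rw [← hS']; omega)
              rw [← hS'] at this
              omega
            have hdrop : (lo - k).toNat = (lo - (k + 1)).toNat + 1 := by omega
            rw [hdrop, List.drop_succ_cons]
    · -- non-separator head: sepsL (l :: rest) k = sepsL rest (k+1)
      have hS : sepsL (l :: rest) k = sepsL rest (k + 1) := by simp [sepsL, he]
      set S' := sepsL rest (k + 1) with hS'
      by_cases h0 : bi = 0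
      · subst h0
        have hLHS : specFB (l :: rest) k 0
            = (k, (collectFB rest (k + 1)).1, l :: (collectFB rest (k + 1)).2) := by
          simp [specFB, he]
        rw [hLHS, collectFB_char rest (k + 1), hS, ← hS']
        rw [if_neg (show ¬((S'.length : Int) < 0) by omega), if_pos rfl]
        cases hSc : S' with
        | nil =>
          simp only [List.length_nil, Nat.cast_zero, lt_irrefl, if_false, List.length_cons]
          rw [if_pos (show k < k + (((rest.length + 1 : Nat)) : Int) by push_cast; omega)]
          simp only [sub_self, Int.toNat_zero, List.drop_zero]
          rw [List.take_of_length_le (by simp)]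
        | cons s tl =>
          have hlb : k + 1 ≤ s := sepsL_lb rest (k + 1) s (by rw [← hS', hSc]; exact List.mem_cons_self)
          have hget : (PySem.List.pyGet? (s :: tl) 0).getD 0 = s := by
            rw [PySem.List.pyGet?_of_nonneg _ le_rfl]; rfl
          simp only [List.length_cons]
          rw [if_pos (show (0:Int) < ((tl.length + 1 : Nat) : Int) by push_cast; omega),
            if_pos (show (0:Int) < ((tl.length + 1 : Nat) : Int) by push_cast; omega), hget,
            if_pos (by omega)]
          simp only [sub_self, Int.toNat_zero, List.drop_zero]
          have : (s - k).toNat = (s - (k + 1)).toNat + 1 := by omega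
          rw [this, List.take_succ_cons]
      · have hLHS : specFB (l :: rest) k bi = specFB rest (k + 1) bi := by
          simp [specFB, he, h0]
        rw [hLHS, ih (k + 1) bi (by omega) hbi]
        simp only [hS, ← hS', List.length_cons]
        push_cast
        have e4 : k + ((rest.length : Int) + 1) = (k + 1) + (rest.length : Int) := by ring
        simp only [e4, if_neg h0]
        by_cases hg : ((S'.length : Int) < bi)
        · simp only [if_pos hg]
        · simp only [if_neg hg]
          set lo := (PySem.List.pyGet? S' (bi - 1)).getD 0 + 1 with hlo
          have hklo : k + 1 ≤ lo := by
            have := sepsL_get_lb rest (k + 1) (bi - 1) (by omega) (by rw [← hS']; omega)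
            rw [← hS'] at this
            omega
          have hdrop : (lo - k).toNat = (lo - (k + 1)).toNat + 1 := by omega
          rw [hdrop, List.drop_succ_cons]

theorem sepsL_eq_filterMap (ls : List String) (k : Int) :
    (PySem.List.enumerate ls k).filterMap (fun p => if pvEmptyLine p.2 then some p.1 else none) = sepsL ls k := by
  induction ls generalizing k with
  | nil => simp [sepsL, PySem.List.enumerate_nil]
  | cons l rest ih =>
    rw [PySem.List.enumerate_cons]
    by_cases he : pvEmptyLine l <;> simp [sepsL, he, ih]


-- ===== VERDICT (by name: the statement is the Claim_ definition above) =====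
theorem find_block_between_empty_lines_spec : Claim_equal_find_block_between_empty_lines := by
  intro lines bi _
  unfold Spec_find_block_between_empty_lines
  unfold find_block_between_empty_lines find_block_between_empty_lines_alt
  by_cases hneg : bi < 0
  · rw [fbLoopA_neg bi hneg _ 0 (-1) [] le_rfl]
    simp [hneg]
  · have hbi : 0 ≤ bi := by omega
    rw [fbLoopA_spec lines 0 bi hbi le_rfl, specFB_char lines 0 bi le_rfl hbi]
    simp only [sepsL_eq_filterMap, PySem.List.len_eq, beq_iff_eq, zero_add, sub_zero]
    set S := sepsL lines 0 with hSdef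
    by_cases hg : (S.length : Int) < bi
    · rw [if_pos hg]
      simp [hg]
    · have hgb : (decide (bi < 0) || decide (bi > (S.length : Int))) = false := by
        simp only [Bool.or_eq_false_iff, decide_eq_false_iff_not]
        exact ⟨by omega, by omega⟩
      rw [if_neg hg]
      simp only [hgb, Bool.false_eq_true, if_false]
      set lo : Int := if bi = 0 then 0 else (PySem.List.pyGet? S (bi - 1)).getD 0 + 1 with hlo
      set hi : Int := if bi < (S.length : Int) then (PySem.List.pyGet? S bi).getD 0 else (lines.length : Int) with hhi
      have hlo0 : 0 ≤ lo := by
        rw [hlo]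
        by_cases h0 : bi = 0
        · simp [h0]
        · rw [if_neg h0]
          have := sepsL_get_lb lines 0 (bi - 1) (by omega) (by rw [← hSdef]; omega)
          rw [← hSdef] at this
          omega
      have hhi0 : 0 ≤ hi := by
        rw [hhi]
        by_cases h2 : bi < (S.length : Int)
        · rw [if_pos h2]
          have := sepsL_get_lb lines 0 bi (by omega) (by rw [← hSdef]; omega)
          rw [← hSdef] at this
          omega
        · rw [if_neg h2]; omega
      rw [PySem.List.slice_toNat lines hlo0 hhi0]
      have htn : (hi - lo).toNat = hi.toNat - lo.toNat := by omega
      rw [htn]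
      by_cases h2 : bi < (S.length : Int)
      · have hSbi := sepsL_get_lb lines 0 bi (by omega) (by rw [← hSdef]; omega)
        rw [← hSdef] at hSbi
        have h3 : (((PySem.List.pyGet? S bi).getD 0 : Int) == -1) = false := by simp; omega
        rw [if_pos h2, if_pos h2, h3, Bool.and_false]
        simp only [Bool.false_eq_true, if_false]
      · rw [if_neg h2, if_neg h2]
        by_cases h1 : lo < hi
        · have h4 : ((lo : Int) != -1) = true := by simp; omega
          rw [if_pos h1, if_pos h1, h4]
          simp
        · rw [if_neg h1, if_neg h1]
          simp
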